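-- pv_equiv track=rewrite | github.com/GroggyAlgorithm/HalBuilder | py/builder.py | _ReplaceCommand
-- ===== SOURCE A (Python) =====
-- def _ReplaceCommand(collection:list[(str,str)], cmd:list[str]) -> list[(str,str)]:
--     replacementCollection = collection
--     for j in range(1, len(cmd)):
--         if cmd[j].endswith("]>>"):
--             break
--         splitted = cmd[j].split(";TO;")
--         if len(splitted) >= 2:
--             replacement = (splitted[0], splitted[1])
--             replacementCollection.append(replacement)
--     return replacementCollection
-- ===== SOURCE B (Python) =====
-- def _ReplaceCommand(collection:list[(str,str)], cmd:list[str]) -> list[(str,str)]: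
--     # phase 1: locate the terminator (first token after index 0 ending in "]>>")
--     end = len(cmd)
--     for j in range(1, len(cmd)):
--         if cmd[j].endswith("]>>"):
--             end = j
--             break
--     # phase 2: walk the region BACKWARDS, collecting pairs, then restore order
--     pairs = []
--     j = end - 1
--     while j >= 1:
--         parts = cmd[j].split(";TO;")
--         if len(parts) >= 2:
--             pairs.append((parts[0], parts[1]))
--         j -= 1
--     pairs.reverse()
--     collection.extend(pairs)
--     return collection
-- ===== Notes on version B (the rewrite author's own statement) =====
-- stated objective: alternative
-- what changed: Two-phase algorithm: a dedicated search loop first locates the terminator index, then a backwards index walk from the terminator down to 1 collects the pairs in reverse and a final reverse restores order, instead of A's single forward scan with an in-loop break and in-loop appends.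
import Mathlib
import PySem

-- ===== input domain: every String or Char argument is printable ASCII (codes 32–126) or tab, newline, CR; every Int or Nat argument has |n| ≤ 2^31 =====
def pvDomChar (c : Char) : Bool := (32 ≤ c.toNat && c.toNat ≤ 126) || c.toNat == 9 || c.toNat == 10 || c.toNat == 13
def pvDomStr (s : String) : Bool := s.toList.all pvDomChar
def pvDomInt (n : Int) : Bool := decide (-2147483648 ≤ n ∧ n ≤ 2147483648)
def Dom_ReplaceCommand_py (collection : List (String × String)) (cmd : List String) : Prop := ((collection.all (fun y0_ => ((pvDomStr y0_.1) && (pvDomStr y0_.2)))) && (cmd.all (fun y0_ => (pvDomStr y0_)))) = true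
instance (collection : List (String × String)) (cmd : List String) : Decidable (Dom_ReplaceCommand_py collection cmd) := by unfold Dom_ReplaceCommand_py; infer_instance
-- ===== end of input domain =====

-- B replaces A's single forward scan with break by a two-phase algorithm: find the terminator
-- index first, then walk the region backwards collecting pairs and reverse at the end (alternative,
-- same cost). Both Pythons mutate `collection` in place identically and return that same object;
-- the theorems below are about the returned value.

-- ===== PORT A =====
-- t.split(";TO;"): PySem.Str.split? is none only for an empty separator, so .getD [] is exact here
def ReplaceCommand_py_split (t : String) : List String :=
  (PySem.Str.split? t ";TO;").getD []

-- the for-loop over range(1, len(cmd)) with its break, as structural recursion over cmd[1:]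
def ReplaceCommand_py_go (acc : List (String × String)) : List String → List (String × String)
  | [] => acc
  | t :: rest =>
    if PySem.Str.endswith t "]>>" then acc
    else
      let splitted := ReplaceCommand_py_split t
      if 2 ≤ splitted.length then
        ReplaceCommand_py_go (acc ++ [(splitted[0]!, splitted[1]!)]) rest
      else
        ReplaceCommand_py_go acc rest

def ReplaceCommand_py (collection : List (String × String)) (cmd : List String) : List (String × String) :=
  ReplaceCommand_py_go collection (cmd.drop 1)

-- ===== PORT B =====
-- phase 1: the terminator-search loop (j runs from 1; `total` is the default end = len(cmd))
def ReplaceCommand_py_findEnd (total : Nat) : List String → Nat → Nat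
  | [], _ => total
  | t :: rest, j =>
    if PySem.Str.endswith t "]>>" then j
    else ReplaceCommand_py_findEnd total rest (j + 1)

-- phase 2's per-token body: the backwards while loop over the region, appending pairs
def ReplaceCommand_py_backPairs : List String → List (String × String)
  | [] => []
  | t :: rest =>
    match (PySem.Str.split? t ";TO;").getD [] with
    | a :: b :: _ => (a, b) :: ReplaceCommand_py_backPairs rest
    | _ => ReplaceCommand_py_backPairs rest

def ReplaceCommand_py_alt (collection : List (String × String)) (cmd : List String) : List (String × String) :=
  let e := ReplaceCommand_py_findEnd cmd.length (cmd.drop 1) 1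
  -- the while loop visits cmd[e-1], …, cmd[1]: that is the reverse of (cmd.drop 1).take (e-1)
  let pairs := ReplaceCommand_py_backPairs (((cmd.drop 1).take (e - 1)).reverse)
  collection ++ pairs.reverse

-- ===== PRECONDITION & SPEC =====
def Spec_ReplaceCommand_py (collection : List (String × String)) (cmd : List String) (out : List (String × String)) : Prop := out = ReplaceCommand_py_alt collection cmd
instance (collection : List (String × String)) (cmd : List String) (out : List (String × String)) : Decidable (Spec_ReplaceCommand_py collection cmd out) := by unfold Spec_ReplaceCommand_py; infer_instance

-- ===== CLAIM (what is proved, stated in full; the proofs are below) =====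
def Claim_equal_ReplaceCommand_py : Prop := ∀ (collection : List (String × String)) (cmd : List String), Dom_ReplaceCommand_py collection cmd → Spec_ReplaceCommand_py collection cmd (ReplaceCommand_py collection cmd)

-- ===== LEMMAS AND PROOFS =====
-- the pair each token contributes (proof-side abbreviation, used to state both sides)
def RCpair (t : String) : Option (String × String) :=
  match (PySem.Str.split? t ";TO;").getD [] with
  | a :: b :: _ => some (a, b)
  | _ => none

def RCkeep (t : String) : Bool := !(PySem.Str.endswith t "]>>")

theorem ReplaceCommand_py_go_eq (l : List String) : ∀ (acc : List (String × String)),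
    ReplaceCommand_py_go acc l = acc ++ ((l.takeWhile RCkeep).filterMap RCpair) := by
  induction l with
  | nil => intro acc; simp [ReplaceCommand_py_go]
  | cons t rest ih =>
    intro acc
    rw [List.takeWhile_cons]
    cases h : PySem.Str.endswith t "]>>" with
    | true =>
      simp only [ReplaceCommand_py_go, h, RCkeep, Bool.not_true, Bool.false_eq_true, reduceIte,
        List.filterMap_nil, List.append_nil]
    | false =>
      simp only [ReplaceCommand_py_go, h, RCkeep, Bool.not_false, Bool.false_eq_true, reduceIte,
        List.filterMap_cons]
      cases hs : ReplaceCommand_py_split t with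
      | nil =>
        have hp : RCpair t = none := by
          unfold RCpair; unfold ReplaceCommand_py_split at hs; rw [hs]
        simp only [ih]
        simp [hp]
      | cons a tl =>
        cases tl with
        | nil =>
          have hp : RCpair t = none := by
            unfold RCpair; unfold ReplaceCommand_py_split at hs; rw [hs]
          simp only [ih]
          simp [hp]
        | cons b tl2 =>
          have hp : RCpair t = some (a, b) := by
            unfold RCpair; unfold ReplaceCommand_py_split at hs; rw [hs]
          simp only [ih]
          simp [hp]

theorem ReplaceCommand_py_backPairs_eq (l : List String) :
    ReplaceCommand_py_backPairs l = l.filterMap RCpair := by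
  induction l with
  | nil => rfl
  | cons t rest ih =>
    unfold ReplaceCommand_py_backPairs RCpair
    rw [List.filterMap_cons]
    cases h : (PySem.Str.split? t ";TO;").getD [] with
    | nil => simpa [RCpair, h] using ih
    | cons a tl =>
      cases tl with
      | nil => simpa [RCpair, h] using ih
      | cons b tl2 => simpa [RCpair, h] using ih

theorem ReplaceCommand_py_findEnd_eq (l : List String) : ∀ (j total : Nat),
    total = j + l.length →
    ReplaceCommand_py_findEnd total l j = j + (l.takeWhile RCkeep).length := by
  induction l with
  | nil => intro j total h; simp [ReplaceCommand_py_findEnd, h]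
  | cons t rest ih =>
    intro j total h
    rw [List.takeWhile_cons]
    cases hk : PySem.Str.endswith t "]>>" with
    | true =>
      have hk' : PySem.Chars.endswith t.toList [']', '>', '>'] = true := by simpa using hk
      simp [ReplaceCommand_py_findEnd, RCkeep, hk']
    | false =>
      have := ih (j + 1) total (by simp at h; omega)
      simp only [ReplaceCommand_py_findEnd, hk, Bool.false_eq_true, reduceIte, this, RCkeep,
        Bool.not_false, List.length_cons]
      omega

theorem take_takeWhile_length {α : Type} (p : α → Bool) (l : List α) :
    l.take ((l.takeWhile p).length) = l.takeWhile p := by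
  induction l with
  | nil => rfl
  | cons x xs ih =>
    rw [List.takeWhile_cons]
    cases h : p x with
    | true => simp [List.take_succ_cons, ih]
    | false => simp

-- ===== VERDICT (by name: the statement is the Claim_ definition above) =====
theorem ReplaceCommand_py_spec : Claim_equal_ReplaceCommand_py := by
  intro collection cmd _
  unfold Spec_ReplaceCommand_py ReplaceCommand_py ReplaceCommand_py_alt
  rw [ReplaceCommand_py_go_eq]
  cases cmd with
  | nil => simp [ReplaceCommand_py_findEnd, ReplaceCommand_py_backPairs]
  | cons c0 cs =>
    have he : ReplaceCommand_py_findEnd (c0 :: cs).length ((c0 :: cs).drop 1) 1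
        = 1 + (((c0 :: cs).drop 1).takeWhile RCkeep).length := by
      apply ReplaceCommand_py_findEnd_eq
      simp [Nat.add_comm]
    simp only [he, Nat.add_sub_cancel_left, ReplaceCommand_py_backPairs_eq,
      List.filterMap_reverse, List.reverse_reverse, take_takeWhile_length]
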